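-- pv_equiv track=rewrite | github.com/kmorgan31/adventofcode | 2015/day8.py | part_1
-- ===== SOURCE A (Python) =====
-- def part_1(data):
--     num_code, num_inmem = 0, 0
--
--     for line in data:
--
--         i = 0
--         while i < len(line):
--             if line[i] == "\"":
--                 num_code += 1
--                 i += 1
--             elif line[i] == "\\":
--                 num_code += 1
--                 if line[i+1] in ["\\", "\""]:
--                     num_inmem += 1
--                     num_code += 1
--                     i += 2
--                 elif line[i+1] == "x":
--                     num_code += 3
--                     num_inmem += 1
--                     i += 4
--             else:
--                 num_inmem += 1
--                 num_code += 1
--                 i += 1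
--     return num_code - num_inmem
-- ===== SOURCE B (Python) =====
-- def in_mem_len(line):
--     # in-memory character count: jump between backslashes with find(),
--     # count plain chunks with len/count, collapse each escape to one char
--     n = 0
--     rest = line
--     while True:
--         j = rest.find('\\')
--         if j == -1:
--             return n + len(rest) - rest.count('"')
--         chunk = rest[:j]
--         n += len(chunk) - chunk.count('"') + 1
--         if rest[j + 1] == 'x':
--             rest = rest[j + 4:]
--         else:
--             rest = rest[j + 2:]
--
--
-- def part_1(data):
--     num_code = sum(len(line) for line in data)
--     num_inmem = sum(in_mem_len(line) for line in data)
--     return num_code - num_inmem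
-- ===== Notes on version B (the rewrite author's own statement) =====
-- stated objective: alternative
-- what changed: B replaces A's fused per-character index/state machine with two counters by two staged passes: num_code is just the sum of raw line lengths, and num_inmem is computed per line by jumping from backslash to backslash with str.find, measuring the plain chunks with len and str.count('"') and collapsing each escape to one character.
-- intended difference: On lines truncated inside a \x escape (fewer than two characters after the \x), A still adds 4 to num_code for the escape and so returns an overhead that counts characters past the end of the line (e.g. 3 for the 2-char line '\x'), while B counts only the characters actually present (1 there); B's value is intended since a line's encoding overhead cannot exceed its actual length. — e.g. on part_1(["\\x"]): A returns 3, B returns 1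
import Mathlib
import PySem

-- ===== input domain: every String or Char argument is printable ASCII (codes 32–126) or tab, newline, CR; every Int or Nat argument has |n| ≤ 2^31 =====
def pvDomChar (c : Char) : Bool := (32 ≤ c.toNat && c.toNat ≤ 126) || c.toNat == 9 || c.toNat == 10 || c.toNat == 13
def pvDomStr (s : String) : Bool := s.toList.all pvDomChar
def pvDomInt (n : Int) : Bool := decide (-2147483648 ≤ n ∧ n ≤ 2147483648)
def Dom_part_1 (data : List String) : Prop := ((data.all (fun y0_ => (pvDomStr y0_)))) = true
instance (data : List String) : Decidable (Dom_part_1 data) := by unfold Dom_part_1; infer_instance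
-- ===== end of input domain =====

-- B computes the two totals of the task in separate staged passes — sum of raw lengths, and a
-- per-line in-memory length obtained by jumping from backslash to backslash with find() and
-- measuring the plain chunks with len/count — instead of A's fused per-character state machine
-- with two counters (alternative decomposition, not claimed faster).

-- ===== PORT A =====
-- the while loop, with i, num_code, num_inmem as in the Python; fuel = len(line)+1 is enough
-- for every terminating run (i advances by ≥ 1 each step); on inputs where the Python loops
-- forever or raises IndexError (excluded by Pre_part_1) the port just returns the current state.
def part1Go (s : List Char) : Nat → Nat → Int → Int → Int × Int
  | 0, _, nc, nm => (nc, nm)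
  | fuel+1, i, nc, nm =>
    match s[i]? with
    | none => (nc, nm)                                -- while condition i < len(line) fails
    | some c =>
      if c = '"' then part1Go s fuel (i+1) (nc+1) nm
      else if c = '\\' then
        match s[i+1]? with
        | none => (nc+1, nm)                          -- Python raises IndexError here (outside Pre_)
        | some c2 =>
          if c2 = '\\' ∨ c2 = '"' then part1Go s fuel (i+2) (nc+2) (nm+1)
          else if c2 = 'x' then part1Go s fuel (i+4) (nc+4) (nm+1)
          else part1Go s fuel i (nc+1) nm             -- Python loops forever here (outside Pre_)
      else part1Go s fuel (i+1) (nc+1) (nm+1)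

def part_1 (data : List String) : Int :=
  let p := data.foldl
    (fun (acc : Int × Int) line => part1Go line.toList (line.toList.length + 1) 0 acc.1 acc.2)
    (0, 0)
  p.1 - p.2

-- ===== PORT B =====
-- in_mem_len of Source B; str.find('\') on ASCII lines is List.idxOf? '\\' on the char list,
-- str.count('"') with a one-character needle is List.count (exact: single-char occurrences
-- cannot overlap), slices rest[:j] / rest[k:] are take / drop — exact on the ASCII domain.
def inMemLen (n : Int) (rest : List Char) : Int :=
  match rest.idxOf? '\\' with
  | none => n + ((rest.length : Int) - rest.count '"')
  | some j =>
    let chunk := rest.take j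
    let n' := n + (((chunk.length : Int) - chunk.count '"') + 1)
    match h2 : rest[j+1]? with
    | none => n'                                      -- Python raises IndexError here (outside Pre_)
    | some nxt =>
      if nxt = 'x' then inMemLen n' (rest.drop (j+4))
      else inMemLen n' (rest.drop (j+2))
termination_by rest.length
decreasing_by
  all_goals
    have hlt : j + 1 < rest.length := by
      by_contra hc
      simp [List.getElem?_eq_none_iff.mpr (by omega : rest.length ≤ j+1)] at h2
    simp [List.length_drop]; omega

def part_1_alt (data : List String) : Int :=
  let num_code := data.foldl (fun a line => a + (line.toList.length : Int)) 0
  let num_inmem := data.foldl (fun a line => a + inMemLen 0 line.toList) 0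
  num_code - num_inmem

-- ===== PRECONDITION & SPEC =====
-- the escape grammar of a line, checked as membership in a regular language by a 5-state
-- automaton folded over the line: 0 = normal, 1 = just after a backslash, 2/3 = skipping the
-- two chars after "\x", 4 = dead (invalid escape).
def lineStep (st : Nat) (c : Char) : Nat :=
  if st = 0 then (if c = '\\' then 1 else 0)
  else if st = 1 then (if c = '\\' ∨ c = '"' then 0 else if c = 'x' then 2 else 4)
  else if st = 2 then 3
  else if st = 3 then 0
  else 4

def lineFin (s : List Char) : Nat := s.foldl lineStep 0

-- Pre_part_1 excludes exactly the lines on which the Python A does not return: a lone trailing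
-- backslash (final state 1: IndexError on line[i+1]) and a backslash followed by a character
-- other than backslash, quote or 'x' (state 4: the loop never advances i, so A diverges).
def lineOk (s : List Char) : Bool := lineFin s != 1 && lineFin s != 4

def Pre_part_1 (data : List String) : Prop := ∀ line ∈ data, lineOk line.toList = true
instance (data : List String) : Decidable (Pre_part_1 data) := by unfold Pre_part_1; infer_instance

def pvWitness_part_1 : List String := ["\"ab\\\\c\\x27\"", "\"\\\"hi\\\"\""]

-- On lines truncated inside a \x escape (fewer than two characters after the \x), A adds 4 to
-- num_code for the escape although the line only contains 2 or 3 of those characters, so A's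
-- overhead counts characters past the end of the line, while B counts only the characters
-- actually present; B's value is the intended one since a line's encoding overhead cannot
-- exceed its actual length.
def D_part_1 (data : List String) : Prop :=
  ∃ line ∈ data, lineFin line.toList = 2 ∨ lineFin line.toList = 3
instance (data : List String) : Decidable (D_part_1 data) := by unfold D_part_1; infer_instance

def Spec_part_1 (data : List String) (out : Int) : Prop := ¬ D_part_1 data → out = part_1_alt data
instance (data : List String) (out : Int) : Decidable (Spec_part_1 data out) := by unfold Spec_part_1; infer_instance

def pvDiffWitness_part_1 : List String := ["\\x"]
def pvDiffWitnessOut_part_1 : Int × Int := (3, 1)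

-- ===== CLAIM (what is proved, stated in full; the proofs are below) =====
def Claim_unchanged_part_1 : Prop := ∀ (data : List String), Dom_part_1 data → Pre_part_1 data → Spec_part_1 data (part_1 data)
def Claim_changed_part_1 : Prop := Dom_part_1 (pvDiffWitness_part_1) ∧ Pre_part_1 (pvDiffWitness_part_1) ∧ D_part_1 (pvDiffWitness_part_1) ∧ part_1 (pvDiffWitness_part_1) = pvDiffWitnessOut_part_1.1 ∧ part_1_alt (pvDiffWitness_part_1) = pvDiffWitnessOut_part_1.2 ∧ pvDiffWitnessOut_part_1.1 ≠ pvDiffWitnessOut_part_1.2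
def Claim_exact_part_1 : Prop := ∀ (data : List String), Dom_part_1 data → Pre_part_1 data → D_part_1 data → part_1 data ≠ part_1_alt data

-- ===== LEMMAS AND PROOFS =====

-- reference (code, mem) counts of one line reached by A's scan, used to connect the two ports
def refP : List Char → Int × Int
  | [] => (0, 0)
  | c :: rest =>
    if c = '"' then ((refP rest).1 + 1, (refP rest).2)
    else if c = '\\' then
      match rest with
      | [] => (0, 0)
      | c2 :: rest2 =>
        if c2 = '\\' ∨ c2 = '"' then ((refP rest2).1 + 2, (refP rest2).2 + 1)
        else if c2 = 'x' then ((refP (rest2.drop 2)).1 + 4, (refP (rest2.drop 2)).2 + 1)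
        else (0, 0)
    else ((refP rest).1 + 1, (refP rest).2 + 1)
termination_by s => s.length
decreasing_by all_goals (simp [List.length_drop]; try omega)

-- how much of A's per-line code count lies beyond the end of the line, by final automaton state
def pad : Nat → Int
  | 2 => 2
  | 3 => 1
  | _ => 0

theorem foldl_dead (r : List Char) : r.foldl lineStep 4 = 4 := by
  induction r with
  | nil => rfl
  | cons a r ih => simpa [lineStep] using ih

theorem fin_cons_other (c : Char) (r : List Char) (h : ¬ c = '\\') :
    lineFin (c :: r) = lineFin r := by simp [lineFin, lineStep, h]

theorem fin_cons_esc (c2 : Char) (r : List Char) (h : c2 = '\\' ∨ c2 = '"') :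
    lineFin ('\\' :: c2 :: r) = lineFin r := by simp [lineFin, lineStep, h]

theorem fin_cons_hex (a b : Char) (r : List Char) :
    lineFin ('\\' :: 'x' :: a :: b :: r) = lineFin r := by simp [lineFin, lineStep]

theorem fin_hex_end : lineFin ['\\', 'x'] = 2 := by decide

theorem fin_hex_one (a : Char) : lineFin ['\\', 'x', a] = 3 := by
  simp [lineFin, lineStep]

theorem fin_cons_bad (c2 : Char) (r : List Char) (h1 : ¬ (c2 = '\\' ∨ c2 = '"'))
    (h2 : ¬ c2 = 'x') : lineFin ('\\' :: c2 :: r) = 4 := by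
  simp [lineFin, lineStep, h1, h2, foldl_dead]

theorem fin_single_bs : lineFin ['\\'] = 1 := by decide

theorem lineStep_le (st : Nat) (c : Char) : lineStep st c ≤ 4 := by
  unfold lineStep; split_ifs <;> omega

theorem fin_le4 (s : List Char) : ∀ st : Nat, st ≤ 4 → s.foldl lineStep st ≤ 4 := by
  induction s with
  | nil => intro st h; simpa using h
  | cons c r ih => intro st h; exact ih _ (lineStep_le st c)


theorem lineOk_cons_other (c : Char) (r : List Char) (h : ¬ c = '\\') :
    lineOk (c :: r) = lineOk r := by unfold lineOk; rw [fin_cons_other _ _ h]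

theorem lineOk_cons_esc (c2 : Char) (r : List Char) (h : c2 = '\\' ∨ c2 = '"') :
    lineOk ('\\' :: c2 :: r) = lineOk r := by unfold lineOk; rw [fin_cons_esc _ _ h]

theorem lineOk_cons_hex (r : List Char) :
    lineOk ('\\' :: 'x' :: r) = lineOk (r.drop 2) := by
  match r with
  | [] => decide
  | [a] => unfold lineOk; rw [fin_hex_one]; simp [lineFin]
  | a :: b :: r4 => unfold lineOk; rw [fin_cons_hex]; simp

theorem lineOk_cons_bad (c2 : Char) (r : List Char) (h1 : ¬ (c2 = '\\' ∨ c2 = '"'))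
    (h2 : ¬ c2 = 'x') : lineOk ('\\' :: c2 :: r) = false := by
  unfold lineOk; rw [fin_cons_bad _ _ h1 h2]; decide

theorem lineOk_single_bs : lineOk ['\\'] = false := by decide

theorem lineOk_fin (s : List Char) (h : lineOk s = true) :
    lineFin s = 0 ∨ lineFin s = 2 ∨ lineFin s = 3 := by
  have h4 : lineFin s ≤ 4 := fin_le4 s 0 (by omega)
  simp [lineOk] at h
  omega

theorem refP_cons_quote (r : List Char) :
    refP ('"' :: r) = ((refP r).1 + 1, (refP r).2) := by rw [refP.eq_def]; simp

theorem refP_cons_esc (c2 : Char) (r : List Char) (h : c2 = '\\' ∨ c2 = '"') :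
    refP ('\\' :: c2 :: r) = ((refP r).1 + 2, (refP r).2 + 1) := by
  rw [refP.eq_def]; simp [h]

theorem refP_cons_hex (r : List Char) :
    refP ('\\' :: 'x' :: r) = ((refP (r.drop 2)).1 + 4, (refP (r.drop 2)).2 + 1) := by
  rw [refP.eq_def]; simp

theorem refP_cons_other (c : Char) (r : List Char) (h1 : ¬ c = '"') (h2 : ¬ c = '\\') :
    refP (c :: r) = ((refP r).1 + 1, (refP r).2 + 1) := by rw [refP.eq_def]; simp [h1, h2]

-- A's while loop computes refP of the remaining suffix, on every line it terminates on
theorem go_spec (fuel : Nat) : ∀ (s : List Char) (i : Nat) (nc nm : Int),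
    s.length ≤ i + fuel → lineOk (s.drop i) = true →
    part1Go s fuel i nc nm = (nc + (refP (s.drop i)).1, nm + (refP (s.drop i)).2) := by
  induction fuel with
  | zero =>
    intro s i nc nm hlen hok
    have hnil : s.drop i = [] := List.drop_eq_nil_of_le (by omega)
    simp [part1Go, hnil, refP]
  | succ fuel ih =>
    intro s i nc nm hlen hok
    cases hgi : s[i]? with
    | none =>
      have hle : s.length ≤ i := by
        by_contra h
        exact absurd hgi (by simp [List.getElem?_eq_getElem (by omega : i < s.length)])
      have hnil : s.drop i = [] := List.drop_eq_nil_of_le hle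
      simp [part1Go, hgi, hnil, refP]
    | some c =>
      have hi : i < s.length := by
        by_contra h
        simp [List.getElem?_eq_none_iff.mpr (by omega : s.length ≤ i)] at hgi
      have hc : s[i] = c := by simpa [List.getElem?_eq_getElem hi] using hgi
      have hdrop : s.drop i = c :: s.drop (i+1) := by
        rw [← List.getElem_cons_drop hi, hc]
      by_cases hq : c = '"'
      · subst hq
        rw [hdrop, lineOk_cons_other _ _ (by decide)] at hok
        have hstep : part1Go s (fuel+1) i nc nm = part1Go s fuel (i+1) (nc+1) nm := by
          simp [part1Go, hgi]
        rw [hstep, ih s (i+1) (nc+1) nm (by omega) hok, hdrop, refP_cons_quote,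
          Prod.mk.injEq]
        exact ⟨by ring, by ring⟩
      · by_cases hb : c = '\\'
        · subst hb
          have hne : s.drop (i+1) ≠ [] := by
            intro hnil
            rw [hdrop, hnil] at hok
            simp [lineOk_single_bs] at hok
          have hi1 : i + 1 < s.length := by
            by_contra h
            exact hne (List.drop_eq_nil_of_le (by omega))
          have hdrop2 : s.drop (i+1) = s[i+1] :: s.drop (i+2) :=
            (List.getElem_cons_drop hi1).symm
          have hgi1 : s[i+1]? = some s[i+1] := List.getElem?_eq_getElem hi1
          by_cases h2 : s[i+1] = '\\' ∨ s[i+1] = '"'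
          · rw [hdrop, hdrop2, lineOk_cons_esc _ _ h2] at hok
            have hstep : part1Go s (fuel+1) i nc nm = part1Go s fuel (i+2) (nc+2) (nm+1) := by
              simp [part1Go, hgi, hgi1, h2]
            rw [hstep, ih s (i+2) (nc+2) (nm+1) (by omega) hok, hdrop, hdrop2,
              refP_cons_esc _ _ h2, Prod.mk.injEq]
            exact ⟨by ring, by ring⟩
          · by_cases hx : s[i+1] = 'x'
            · rw [hdrop, hdrop2, hx, lineOk_cons_hex, List.drop_drop] at hok
              have h24 : i + 2 + 2 = i + 4 := by omega
              rw [h24] at hok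
              have hstep : part1Go s (fuel+1) i nc nm = part1Go s fuel (i+4) (nc+4) (nm+1) := by
                simp [part1Go, hgi, hgi1, hx]
              rw [hstep, ih s (i+4) (nc+4) (nm+1) (by omega) hok, hdrop, hdrop2, hx,
                refP_cons_hex, List.drop_drop, h24, Prod.mk.injEq]
              exact ⟨by ring, by ring⟩
            · rw [hdrop, hdrop2, lineOk_cons_bad _ _ h2 hx] at hok
              simp at hok
        · rw [hdrop, lineOk_cons_other _ _ hb] at hok
          have hstep : part1Go s (fuel+1) i nc nm = part1Go s fuel (i+1) (nc+1) (nm+1) := by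
            simp [part1Go, hgi, hq, hb]
          rw [hstep, ih s (i+1) (nc+1) (nm+1) (by omega) hok, hdrop,
            refP_cons_other _ _ hq hb, Prod.mk.injEq]
          exact ⟨by ring, by ring⟩


-- character-step unfoldings of inMemLen
theorem inMemLen_nil (n : Int) : inMemLen n [] = n := by
  rw [inMemLen.eq_def]; simp

theorem inMemLen_cons_other (n : Int) (c : Char) (r : List Char) (h : ¬ c = '\\') :
    inMemLen n (c :: r) = inMemLen (n + (if c = '"' then 0 else 1)) r := by
  have hacc : ∀ l : List Char, (((c :: l).length : Int) - (c :: l).count '"'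
      = (if c = '"' then 0 else 1) + ((l.length : Int) - l.count '"')) := by
    intro l
    simp [List.count_cons]
    split_ifs <;> ring
  rw [inMemLen.eq_def]
  have hco : (c :: r).idxOf? '\\' = (r.idxOf? '\\').map (· + 1) := by
    simp [List.idxOf?_cons, h]
  cases hr : r.idxOf? '\\' with
  | none =>
    rw [inMemLen.eq_def]
    rw [hr] at hco
    simp only [hco, hr, Option.map_none]
    have h0 := hacc r
    simp only [List.length_cons] at h0 ⊢
    push_cast at h0 ⊢
    linarith [h0]
  | some j =>
    rw [inMemLen.eq_def]
    rw [hr] at hco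
    simp only [hco, hr, Option.map_some]
    have htake : (c :: r).take (j+1) = c :: r.take j := by simp
    simp only [htake]
    have hget : (c :: r)[j+1+1]? = r[j+1]? := by simp
    rw [hget]
    have heq : n + ((((c :: r.take j).length : Int) - (c :: r.take j).count '"') + 1)
        = (n + (if c = '"' then 0 else 1)) + ((((r.take j).length : Int) - (r.take j).count '"') + 1) := by
      rw [hacc (r.take j)]; ring
    cases hg : r[j+1]? with
    | none => simpa using heq
    | some nxt =>
      have hd4 : (c :: r).drop (j+1+4) = r.drop (j+4) := by
        show (c :: r).drop (j+4+1) = r.drop (j+4); simp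
      have hd2 : (c :: r).drop (j+1+2) = r.drop (j+2) := by
        show (c :: r).drop (j+2+1) = r.drop (j+2); simp
      simp only [hd4, hd2]
      by_cases hxx : nxt = 'x'
      · simp only [if_pos hxx]; rw [heq]
      · simp only [if_neg hxx]; rw [heq]

theorem inMemLen_cons_hex (n : Int) (r : List Char) :
    inMemLen n ('\\' :: 'x' :: r) = inMemLen (n + 1) (r.drop 2) := by
  rw [inMemLen.eq_def]
  simp [List.idxOf?_cons]
  simp [List.getElem?_cons_zero]

theorem inMemLen_cons_esc (n : Int) (c2 : Char) (r : List Char) (hx : ¬ c2 = 'x') :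
    inMemLen n ('\\' :: c2 :: r) = inMemLen (n + 1) r := by
  rw [inMemLen.eq_def]
  simp [List.idxOf?_cons]
  simp [List.getElem?_cons_zero, hx]

-- the heart of the equivalence: on a line whose scan terminates, A's code count is the line's
-- length plus pad(final state), and B's in-memory length is A's num_inmem
theorem mainLem : ∀ (k : Nat) (s : List Char), s.length ≤ k →
    (lineFin s = 0 ∨ lineFin s = 2 ∨ lineFin s = 3) →
    (refP s).1 = (s.length : Int) + pad (lineFin s) ∧
      ∀ n : Int, inMemLen n s = n + (refP s).2 := by
  intro k
  induction k with
  | zero =>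
    intro s hlen _
    have : s = [] := List.eq_nil_of_length_eq_zero (by omega)
    subst this
    refine ⟨by simp [refP, lineFin, pad], fun n => by simp [inMemLen_nil, refP]⟩
  | succ k ih =>
    intro s hlen hfin
    match s with
    | [] => exact ⟨by simp [refP, lineFin, pad], fun n => by simp [inMemLen_nil, refP]⟩
    | c :: r =>
      by_cases hb : c = '\\'
      · subst hb
        match r with
        | [] => rw [fin_single_bs] at hfin; omega
        | c2 :: r2 =>
          by_cases h2 : c2 = '\\' ∨ c2 = '"'
          · rw [fin_cons_esc _ _ h2] at hfin ⊢
            obtain ⟨ha, hm⟩ := ih r2 (by simp at hlen ⊢; omega) hfin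
            have hx : ¬ c2 = 'x' := by rcases h2 with h | h <;> subst h <;> decide
            refine ⟨?_, fun n => ?_⟩
            · rw [refP_cons_esc _ _ h2]; simp [ha]; ring
            · rw [inMemLen_cons_esc _ _ _ hx, hm (n+1), refP_cons_esc _ _ h2]; ring
          · by_cases hx : c2 = 'x'
            · subst hx
              match r2 with
              | [] =>
                rw [fin_hex_end]
                refine ⟨by rw [refP_cons_hex]; simp [refP, pad], fun n => ?_⟩
                rw [inMemLen_cons_hex, refP_cons_hex]
                simp [inMemLen_nil, refP]
              | [a] =>
                rw [fin_hex_one]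
                refine ⟨by rw [refP_cons_hex]; simp [refP, pad], fun n => ?_⟩
                rw [inMemLen_cons_hex, refP_cons_hex]
                simp [inMemLen_nil, refP]
              | a :: b :: r4 =>
                rw [fin_cons_hex] at hfin ⊢
                obtain ⟨ha, hm⟩ := ih r4 (by simp at hlen ⊢; omega) hfin
                refine ⟨?_, fun n => ?_⟩
                · rw [refP_cons_hex]; simp [ha]; ring
                · rw [inMemLen_cons_hex, refP_cons_hex]
                  simp only [List.drop_succ_cons, List.drop_zero]
                  rw [hm (n+1)]; ring
            · rw [fin_cons_bad _ _ h2 hx] at hfin; omega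
      · rw [fin_cons_other _ _ hb] at hfin ⊢
        obtain ⟨ha, hm⟩ := ih r (by simp at hlen ⊢; omega) hfin
        by_cases hq : c = '"'
        · subst hq
          refine ⟨?_, fun n => ?_⟩
          · rw [refP_cons_quote]; simp [ha]; ring
          · rw [inMemLen_cons_other _ _ _ hb, refP_cons_quote]
            norm_num
            rw [hm n]
        · refine ⟨?_, fun n => ?_⟩
          · rw [refP_cons_other _ _ hq hb]; simp [ha]; ring
          · rw [inMemLen_cons_other _ _ _ hb]; simp only [if_neg hq]
            rw [hm (n+1), refP_cons_other _ _ hq hb]; ring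

theorem foldl_add_map (f : String → Int) : ∀ (ds : List String) (t : Int),
    ds.foldl (fun a l => a + f l) t = t + (ds.map f).sum := by
  intro ds
  induction ds with
  | nil => simp
  | cons l ds ih => intro t; simp only [List.foldl_cons, List.map_cons, List.sum_cons, ih]; ring

theorem foldA_spec : ∀ (ds : List String) (nc nm : Int), (∀ l ∈ ds, lineOk l.toList = true) →
    ds.foldl (fun (acc : Int × Int) line =>
        part1Go line.toList (line.toList.length + 1) 0 acc.1 acc.2) (nc, nm)
      = (nc + (ds.map (fun l => (refP l.toList).1)).sum,
         nm + (ds.map (fun l => (refP l.toList).2)).sum) := by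
  intro ds
  induction ds with
  | nil => simp
  | cons l ds ih =>
    intro nc nm hok
    have hl := go_spec (l.toList.length + 1) l.toList 0 nc nm (by omega)
      (by simpa using hok l (by simp))
    simp only [List.drop_zero] at hl
    simp only [List.foldl_cons, hl, List.map_cons, List.sum_cons,
      ih _ _ (fun x hx => hok x (by simp [hx])), Prod.mk.injEq]
    exact ⟨by ring, by ring⟩

-- A = B + Σ pad(final state of each line), for every input A terminates on
theorem key (data : List String) (hpre : Pre_part_1 data) :
    part_1 data = part_1_alt data + (data.map (fun l => pad (lineFin l.toList))).sum := by
  have hfins : ∀ l ∈ data, lineFin l.toList = 0 ∨ lineFin l.toList = 2 ∨ lineFin l.toList = 3 :=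
    fun l hl => lineOk_fin _ (hpre l hl)
  have hsum : ∀ ds : List String, (∀ l ∈ ds, lineFin l.toList = 0 ∨ lineFin l.toList = 2 ∨ lineFin l.toList = 3) →
      (ds.map (fun l => (refP l.toList).1)).sum
        = (ds.map (fun l => (l.toList.length : Int))).sum + (ds.map (fun l => pad (lineFin l.toList))).sum ∧
      (ds.map (fun l => (refP l.toList).2)).sum
        = (ds.map (fun l => inMemLen 0 l.toList)).sum := by
    intro ds
    induction ds with
    | nil => simp
    | cons l ds ih =>
      intro h
      obtain ⟨ha, hm⟩ := mainLem l.toList.length l.toList (le_refl _) (h l (by simp))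
      obtain ⟨ih1, ih2⟩ := ih (fun x hx => h x (by simp [hx]))
      refine ⟨?_, ?_⟩
      · simp only [List.map_cons, List.sum_cons, ih1, ha]; ring
      · simp only [List.map_cons, List.sum_cons, ih2, hm 0]; ring
  obtain ⟨h1, h2⟩ := hsum data hfins
  unfold part_1 part_1_alt
  rw [foldA_spec data 0 0 hpre, foldl_add_map, foldl_add_map]
  simp only [h1, h2]
  ring

theorem pad_nonneg (f : Nat) : 0 ≤ pad f := by
  unfold pad; split <;> omega

-- ===== VERDICT (by name: the statement is the Claim_ definition above) =====
theorem part_1_spec : Claim_unchanged_part_1 := by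
  intro data _ hpre
  unfold Spec_part_1
  intro hnd
  rw [key data hpre]
  have hz : (data.map (fun l => pad (lineFin l.toList))).sum = 0 := by
    apply List.sum_eq_zero
    intro x hx
    simp only [List.mem_map] at hx
    obtain ⟨l, hl, rfl⟩ := hx
    have h4 : lineFin l.toList ≤ 4 := fin_le4 l.toList 0 (by omega)
    have hn2 : ¬ (lineFin l.toList = 2 ∨ lineFin l.toList = 3) := by
      intro hc
      exact hnd ⟨l, hl, hc⟩
    unfold pad
    split <;> omega
  rw [hz]; ring

theorem part_1_changed : Claim_changed_part_1 := by
  unfold Claim_changed_part_1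
  refine ⟨by decide, by decide, by decide, by decide, ?_, by decide⟩
  show part_1_alt ["\\x"] = (1 : Int)
  have hs : ("\\x" : String).toList = ['\\', 'x'] := by rfl
  unfold part_1_alt
  simp only [List.foldl_cons, List.foldl_nil, hs]
  rw [inMemLen_cons_hex]
  simp [inMemLen_nil]

theorem part_1_tight : Claim_exact_part_1 := by
  intro data _ hpre hd
  rw [key data hpre]
  obtain ⟨l, hl, hfin⟩ := hd
  have hmem : pad (lineFin l.toList) ∈ data.map (fun l => pad (lineFin l.toList)) :=
    List.mem_map_of_mem hl
  have hpos : 1 ≤ pad (lineFin l.toList) := by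
    rcases hfin with h | h <;> rw [h] <;> decide
  have hge : pad (lineFin l.toList) ≤ (data.map (fun l => pad (lineFin l.toList))).sum :=
    List.single_le_sum
      (fun x hx => by obtain ⟨l', -, rfl⟩ := List.mem_map.mp hx; exact pad_nonneg _) _ hmem
  omega
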